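-- pv_equiv track=rewrite | github.com/chikoneuru/dataflower | scheduler/shared/safe_printing.py | is_binary_field
-- ===== SOURCE A (Python) =====
-- def is_binary_field(value: str) -> bool:
--     """
--     Check if a string field contains binary data that should be truncated.
--
--     Args:
--         value: String to check
--
--     Returns:
--         True if the string appears to contain binary data
--     """
--     # Check for common binary field patterns
--     binary_patterns = [
--         '_b64', '_img_b64', '_image_b64', '_data_b64',  # Base64 image fields
--         '_hex', '_binary', '_data', '_payload',          # Binary data fields
--         'img', 'image', 'photo', 'picture',              # Image fields
--         'file', 'content', 'body'                        # File/content fields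
--     ]
--
--     # Check if the string looks like base64 (alphanumeric + / + = padding)
--     if len(value) > 100:  # Only check long strings
--         base64_chars = set('ABCDEFGHIJKLMNOPQRSTUVWXYZabcdefghijklmnopqrstuvwxyz0123456789+/=')
--         if all(c in base64_chars for c in value):
--             return True
--
--     return False
-- ===== SOURCE B (Python) =====
-- import re
--
-- _B64_RE = re.compile(r'[A-Za-z0-9+/=]+')
--
-- def is_binary_field(value: str) -> bool:
--     """Re-implementation: regex fullmatch over the whole string instead of a
--     per-character set-membership scan."""
--     if len(value) > 100:
--         return bool(_B64_RE.fullmatch(value))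
--     return False
-- ===== Notes on version B (the rewrite author's own statement) =====
-- stated objective: faster
-- what changed: Replaces the hand-built base64 character set and the per-character all()-generator scan with a single precompiled regex fullmatch of the class [A-Za-z0-9+/=]+ inside the same len>100 guard (the scan runs in C, not the Python interpreter), and drops the dead binary_patterns list.
import Mathlib
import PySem

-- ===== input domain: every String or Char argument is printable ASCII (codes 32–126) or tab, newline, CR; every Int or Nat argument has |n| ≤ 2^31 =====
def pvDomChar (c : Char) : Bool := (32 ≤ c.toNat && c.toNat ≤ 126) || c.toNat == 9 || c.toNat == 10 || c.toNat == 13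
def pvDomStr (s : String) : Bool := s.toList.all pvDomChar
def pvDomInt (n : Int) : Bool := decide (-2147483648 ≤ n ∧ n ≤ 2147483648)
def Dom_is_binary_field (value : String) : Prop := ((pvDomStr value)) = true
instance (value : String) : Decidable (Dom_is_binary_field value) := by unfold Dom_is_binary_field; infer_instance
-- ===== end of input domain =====

-- B replaces A's hand-built base64 character set and all()-scan with a single regex
-- fullmatch of [A-Za-z0-9+/=]+ inside the same len>100 guard (objective: idiomatic).

-- ===== PORT A =====
-- A builds set('ABC…+/=') and scans the string with all(c in base64_chars for c in value).
def is_binary_field (value : String) : Bool :=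
  if value.toList.length > 100 then
    let base64_chars : PySem.Set Char :=
      PySem.Set.ofList "ABCDEFGHIJKLMNOPQRSTUVWXYZabcdefghijklmnopqrstuvwxyz0123456789+/=".toList
    if value.toList.all (fun c => PySem.Set.contains base64_chars c) then true
    else false
  else false

-- ===== PORT B =====
-- One character of the regex class [A-Za-z0-9+/=] (exact for this ASCII class).
def pvB64ClassChar (c : Char) : Bool :=
  (decide ('A' ≤ c) && decide (c ≤ 'Z')) || (decide ('a' ≤ c) && decide (c ≤ 'z')) ||
  (decide ('0' ≤ c) && decide (c ≤ '9')) || c == '+' || c == '/' || c == '='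

-- re.fullmatch(r'[A-Za-z0-9+/=]+', value): nonempty and every char in the class.
def is_binary_field_alt (value : String) : Bool :=
  if value.toList.length > 100 then
    !value.toList.isEmpty && value.toList.all pvB64ClassChar
  else false

-- ===== PRECONDITION & SPEC =====
def Spec_is_binary_field (value : String) (out : Bool) : Prop := out = is_binary_field_alt value
instance (value : String) (out : Bool) : Decidable (Spec_is_binary_field value out) := by unfold Spec_is_binary_field; infer_instance

-- ===== CLAIM (what is proved, stated in full; the proofs are below) =====
def Claim_equal_is_binary_field : Prop := ∀ (value : String), Dom_is_binary_field value → Spec_is_binary_field value (is_binary_field value)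

-- ===== LEMMAS AND PROOFS =====

-- Per-character agreement: membership in A's set equals B's regex character class.
theorem pv_contains_eq_class (c : Char) :
    PySem.Set.contains
      (PySem.Set.ofList "ABCDEFGHIJKLMNOPQRSTUVWXYZabcdefghijklmnopqrstuvwxyz0123456789+/=".toList) c
      = pvB64ClassChar c := by
  simp [PySem.Set.contains, PySem.Set.ofList, PySem.Set.add, pvB64ClassChar]
  rw [Bool.eq_iff_iff]
  simp only [Bool.or_eq_true, Bool.and_eq_true, decide_eq_true_eq, beq_iff_eq,
    Char.le_def, Char.ext_iff, ← UInt32.toNat_inj]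
  simp [UInt32.le_iff_toNat_le]
  omega

-- ===== VERDICT (by name: the statement is the Claim_ definition above) =====
theorem is_binary_field_spec : Claim_equal_is_binary_field := by
  intro value _
  unfold Spec_is_binary_field is_binary_field is_binary_field_alt
  by_cases h : value.toList.length > 100
  · rw [if_pos h, if_pos h]
    have hne : value.toList.isEmpty = false := by
      cases hl : value.toList with
      | nil => simp [hl] at h
      | cons a l => simp
    have hfun : (fun c => PySem.Set.contains
        (PySem.Set.ofList "ABCDEFGHIJKLMNOPQRSTUVWXYZabcdefghijklmnopqrstuvwxyz0123456789+/=".toList) c)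
        = pvB64ClassChar := funext pv_contains_eq_class
    show (if (value.toList.all fun c => PySem.Set.contains
        (PySem.Set.ofList "ABCDEFGHIJKLMNOPQRSTUVWXYZabcdefghijklmnopqrstuvwxyz0123456789+/=".toList) c) = true
        then true else false) = (!value.toList.isEmpty && value.toList.all pvB64ClassChar)
    rw [hfun, hne]
    cases value.toList.all pvB64ClassChar <;> rfl
  · rw [if_neg h, if_neg h]
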